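-- pv_equiv track=rewrite | github.com/121watts/dsa | subsets_with_duplicates.py | get_distinct_subsets
-- ===== SOURCE A (Python) =====
-- def get_distinct_subsets(s):
--     """
--     Args:
--      s(str)
--     Returns:
--      list_str
--     """
--
--     s = "".join(sorted(s))
--     currSet, subsets = [], []
--
--     def backtrack(index, currSet, subsets):
--         if index == len(s):
--             subsets.append(currSet.copy())
--             return
--
--         currSet.append(s[index])
--         backtrack(index + 1, currSet, subsets)
--         currSet.pop()
--
--         while index < len(s) - 1 and s[index] == s[index + 1]:
--             index += 1
--
--         backtrack(index + 1, currSet, subsets)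
--
--
--     backtrack(0, currSet, subsets)
--
--     return subsets
-- ===== SOURCE B (Python) =====
-- def get_distinct_subsets(s):
--     """
--     Args:
--      s(str)
--     Returns:
--      list_str
--     """
--     # Enumerate multiplicity vectors over the sorted distinct characters
--     # (each count from its maximum down to 0, later characters varying
--     # fastest): this yields exactly A's DFS order, without backtracking
--     # over individual positions.
--     cs = list(s)
--     pairs = [(c, cs.count(c)) for c in sorted(set(cs))]
--     out = []
--
--     def build(rest, acc):
--         if not rest:
--             out.append(acc)
--             return
--         (c, n), rest2 = rest[0], rest[1:]
--         for k in range(n, -1, -1):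
--             build(rest2, acc + [c] * k)
--
--     build(pairs, [])
--     return out
-- ===== Notes on version B (the rewrite author's own statement) =====
-- stated objective: simpler
-- what changed: Replaces A's positional backtracking with duplicate-skipping by enumerating, over the sorted distinct characters with their counts, every multiplicity vector (each count descending, later characters varying fastest), which produces the same subsets in the same order.
import Mathlib
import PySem

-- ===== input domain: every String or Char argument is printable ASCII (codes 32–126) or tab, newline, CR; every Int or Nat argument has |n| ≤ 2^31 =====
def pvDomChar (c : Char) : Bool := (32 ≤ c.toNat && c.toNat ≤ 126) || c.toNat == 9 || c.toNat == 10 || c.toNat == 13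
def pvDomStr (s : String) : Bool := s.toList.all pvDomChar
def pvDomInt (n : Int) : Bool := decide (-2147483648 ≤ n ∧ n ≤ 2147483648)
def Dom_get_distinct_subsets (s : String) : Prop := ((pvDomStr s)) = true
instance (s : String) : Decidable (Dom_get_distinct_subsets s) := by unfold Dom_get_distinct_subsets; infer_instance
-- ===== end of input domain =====

-- B replaces A's include/skip backtracking over the sorted characters by a direct
-- enumeration of multiplicity vectors over the sorted distinct characters (same values,
-- same order); objective: simpler.

-- ===== PORT A =====
-- the inner 'while index < len(s)-1 and s[index]==s[index+1]: index += 1' loop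
def pvSkipA (l : List Char) (i : Nat) : Nat :=
  if h : i + 1 < l.length then
    if l[i]'(by omega) = l[i+1]'h then pvSkipA l (i+1) else i
  else i
termination_by l.length - i

-- cited by pvBTA's decreasing_by
theorem pvSkipA_ge (l : List Char) (i : Nat) : i ≤ pvSkipA l i := by
  fun_induction pvSkipA l i <;> omega

-- backtrack(index, currSet, subsets); the Python tests 'index == len(s)' and every
-- reachable index satisfies index ≤ len(s), so the guard is written 'len(s) ≤ i'
def pvBTA (l : List Char) (i : Nat) (cur : List String) (out : List (List String)) : List (List String) :=
  if h : l.length ≤ i then out ++ [cur]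
  else
    pvBTA l (pvSkipA l i + 1) cur (pvBTA l (i+1) (cur ++ [String.ofList [l[i]'(by omega)]]) out)
termination_by l.length - i
decreasing_by
  · omega
  · have := pvSkipA_ge l i; omega

def get_distinct_subsets (s : String) : List (List String) :=
  pvBTA (PySem.List.sorted s.toList (fun c => c) false) 0 [] []

-- ===== PORT B =====
-- build(rest, acc): for k in range(n, -1, -1): build(rest2, acc + [c]*k); out.append at the leaf
def pvBuildB (pairs : List (Char × Int)) (acc : List String) (out : List (List String)) : List (List String) :=
  match pairs with
  | [] => out ++ [acc]
  | (c, n) :: rest =>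
    (PySem.List.pyRange n (-1) (-1)).foldl
      (fun o k => pvBuildB rest (acc ++ List.replicate k.toNat (String.ofList [c])) o) out

-- pairs = [(c, cs.count(c)) for c in sorted(set(cs))]; the 1-char strings of the Python
-- set/sort are represented by their Char
def get_distinct_subsets_alt (s : String) : List (List String) :=
  pvBuildB
    ((PySem.List.sorted (PySem.Set.ofList s.toList) (fun c => c) false).map
      (fun c => (c, (PySem.List.count s.toList c : Int)))) [] []

-- ===== PRECONDITION & SPEC =====
def Spec_get_distinct_subsets (s : String) (out : List (List String)) : Prop := out = get_distinct_subsets_alt s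
instance (s : String) (out : List (List String)) : Decidable (Spec_get_distinct_subsets s out) := by unfold Spec_get_distinct_subsets; infer_instance

-- ===== CLAIM (what is proved, stated in full; the proofs are below) =====
def Claim_equal_get_distinct_subsets : Prop := ∀ (s : String), Dom_get_distinct_subsets s → Spec_get_distinct_subsets s (get_distinct_subsets s)

-- ===== LEMMAS AND PROOFS =====

-- [n, n-1, …, 0]
def descN (n : Nat) : List Nat := (List.range (n+1)).map (fun k => n - k)

-- multiplicity-vector enumeration with Nat counts (the mathematical shape of B)
def pvG : List (Char × Nat) → List String → List (List String)
  | [], acc => [acc]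
  | (c, n) :: ps, acc =>
    (descN n).flatMap (fun k => pvG ps (acc ++ List.replicate k (String.ofList [c])))

-- recursion-tree shape of A's backtracking on a character list
def pvF : List Char → List String → List (List String)
  | [], acc => [acc]
  | c :: t, acc => pvF t (acc ++ [String.ofList [c]]) ++ pvF (t.dropWhile (· = c)) acc
termination_by l => l.length
decreasing_by
  · simp
  · have := List.length_dropWhile_le (· = c) t; simp; omega

def pvPairsOf (l : List Char) : List (Char × Nat) :=
  (PySem.List.sorted (PySem.Set.ofList l) (fun c => c) false).map (fun c => (c, List.count c l))

theorem descN_succ' (n : Nat) : descN (n+1) = (descN n).map (· + 1) ++ [0] := by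
  simp [descN, List.range_succ, List.map_map]
  intro a ha
  omega

theorem pyRange_down (m : Nat) :
    PySem.List.pyRange (m : Int) (-1) (-1) = (descN m).map (fun k => Int.ofNat k) := by
  have hm : (-1 : Int) < (m : Int) := by omega
  have hc : (((m:Int) - -1 + - -1 - 1) / - -1).toNat = m + 1 := by norm_num
  simp only [PySem.List.pyRange, if_neg (show ¬(-1:Int) = 0 by omega),
    if_neg (show ¬(0:Int) < -1 by omega), if_pos hm, hc, descN, List.map_map]
  apply List.map_congr_left
  intro k hk
  simp at hk ⊢
  omega

theorem pvSkipA_drop (l : List Char) (i : Nat) (h : i < l.length) :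
    l.drop (pvSkipA l i + 1) = (l.drop (i+1)).dropWhile (· = l[i]'h) := by
  fun_induction pvSkipA l i with
  | case1 i h1 heq ih =>
    rw [ih (by omega)]
    rw [List.drop_eq_getElem_cons h1]
    rw [List.dropWhile_cons]
    simp [heq]
  | case2 i h1 hne =>
    rw [List.drop_eq_getElem_cons h1]
    rw [List.dropWhile_cons]
    have hd : (decide (l[i+1] = l[i])) = false := by
      simp; exact fun h2 => hne h2.symm
    simp [hd]
  | case3 i h1 =>
    have : l.drop (i+1) = [] := List.drop_eq_nil_of_le (by omega)
    simp [this]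

theorem pvBTA_eq_pvF (l : List Char) (i : Nat) (cur : List String) (out : List (List String)) :
    pvBTA l i cur out = out ++ pvF (l.drop i) cur := by
  fun_induction pvBTA l i cur out with
  | case1 i cur out h =>
    rw [List.drop_eq_nil_of_le (by omega)]
    simp [pvF]
  | case2 i cur out h ih1 ih2 ih3 =>
    rw [ih3, ih1]
    rw [List.drop_eq_getElem_cons (show i < l.length by omega)]
    conv_rhs => rw [pvF]
    rw [pvSkipA_drop l i (by omega)]
    simp

theorem pvBuildB_eq_pvG (ps : List (Char × Int)) (acc : List String) (out : List (List String))
    (h : ∀ p ∈ ps, 0 ≤ p.2) :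
    pvBuildB ps acc out = out ++ pvG (ps.map (fun p => (p.1, p.2.toNat))) acc := by
  induction ps generalizing acc out with
  | nil => simp [pvBuildB, pvG]
  | cons p rest ih =>
    obtain ⟨c, n⟩ := p
    have hn : ((n.toNat : Nat) : Int) = n := Int.toNat_of_nonneg (h (c, n) (by simp))
    rw [pvBuildB, show n = ((n.toNat : Nat) : Int) from hn.symm, pyRange_down, List.foldl_map]
    rw [PySem.List.foldl_congr_mem _ _
      (fun o k => o ++ pvG (rest.map (fun p => (p.1, p.2.toNat)))
          (acc ++ List.replicate k (String.ofList [c]))) _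
      (by
        intro o k hk
        rw [ih _ _ (fun p hp => h p (by simp [hp]))]
        simp)]
    rw [PySem.List.foldl_append_eq_flatMap]
    simp only [List.map_cons, pvG, Int.toNat_natCast]

theorem pvF_run (n : Nat) (r : List Char) (c : Char) (acc : List String)
    (hr : ∀ d ∈ r.head?, d ≠ c) :
    pvF (List.replicate n c ++ r) acc
      = (descN n).flatMap (fun k => pvF r (acc ++ List.replicate k (String.ofList [c]))) := by
  have h2 : List.dropWhile (· = c) r = r := by
    cases r with
    | nil => rfl
    | cons d t =>
      rw [List.dropWhile_cons]
      simp [hr d (by simp)]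
  induction n generalizing acc with
  | zero => simp [descN]
  | succ n ih =>
    have hdw : (List.replicate n c ++ r).dropWhile (· = c) = r := by
      clear ih
      induction n with
      | zero => simpa using h2
      | succ m ihm => simpa [List.replicate_succ, List.dropWhile_cons] using ihm
    rw [List.replicate_succ, List.cons_append, pvF, hdw, ih]
    rw [descN_succ']
    rw [List.flatMap_append, List.flatMap_map]
    simp only [List.flatMap_cons, List.flatMap_nil, List.append_nil, List.replicate_zero]
    congr 1
    apply List.flatMap_congr
    intro x hx
    simp [List.replicate_succ, List.append_assoc]

-- all elements of the dropWhile-suffix are > c, for a sorted list with head c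
theorem pvSuffix_gt (c : Char) (t : List Char) (h : (c :: t).Pairwise (· ≤ ·))
    (x : Char) (hx : x ∈ (c :: t).dropWhile (· = c)) : c < x := by
  have hsub : ((c :: t).dropWhile (· = c)).Sublist (c :: t) := List.dropWhile_sublist _
  have hmem : x ∈ c :: t := hsub.mem hx
  have hle : c ≤ x := by
    rcases List.mem_cons.1 hmem with h1 | h1
    · exact le_of_eq h1.symm
    · exact List.rel_of_pairwise_cons h h1
  rcases lt_or_eq_of_le hle with h1 | h1
  · exact h1
  · exfalso
    have hp : ((c :: t).dropWhile (· = c)).Pairwise (· ≤ ·) := List.Pairwise.sublist hsub h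
    cases hd : (c :: t).dropWhile (· = c) with
    | nil => rw [hd] at hx; simp at hx
    | cons d r =>
      rw [hd] at hx hp
      have hdc : ¬ (d = c) := by
        have := List.head?_dropWhile_not (· = c) (c :: t)
        rw [hd] at this
        simpa using this
      rcases List.mem_cons.1 hx with h2 | h2
      · exact hdc (h2 ▸ h1.symm)
      · have : d ≤ x := List.rel_of_pairwise_cons hp h2
        have hdm : d ∈ c :: t := (hd ▸ hsub).mem (by simp)
        have hcd : c ≤ d := by
          rcases List.mem_cons.1 hdm with h3 | h3
          · exact le_of_eq h3.symm
          · exact List.rel_of_pairwise_cons h h3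
        exact hdc (le_antisymm (h1.symm ▸ this) hcd)

theorem pvRunDecomp (c : Char) (t : List Char) (h : (c :: t).Pairwise (· ≤ ·)) :
    c :: t = List.replicate (List.count c (c :: t)) c ++ (c :: t).dropWhile (· = c) := by
  have htw : (c :: t).takeWhile (· = c) = List.replicate (List.count c (c :: t)) c := by
    have hall : ∀ x ∈ (c :: t).takeWhile (· = c), x = c := by
      intro x hx
      have := List.mem_takeWhile_imp hx
      simpa using this
    have hrep : (c :: t).takeWhile (· = c)
        = List.replicate ((c :: t).takeWhile (· = c)).length c :=
      List.eq_replicate_of_mem hall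
    rw [hrep]
    congr 1
    have hsplit := List.takeWhile_append_dropWhile (p := (· = c)) (l := c :: t)
    have hcnt : List.count c (c :: t)
        = List.count c ((c :: t).takeWhile (· = c)) + List.count c ((c :: t).dropWhile (· = c)) := by
      rw [← List.count_append, hsplit]
    have hzero : List.count c ((c :: t).dropWhile (· = c)) = 0 := by
      rw [List.count_eq_zero]
      intro hmem
      exact absurd rfl (ne_of_gt (pvSuffix_gt c t h c hmem))
    have hfull : List.count c ((c :: t).takeWhile (· = c)) = ((c :: t).takeWhile (· = c)).length := by
      rw [hrep]
      simp
    omega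
  conv_lhs => rw [← List.takeWhile_append_dropWhile (p := (· = c)) (l := c :: t)]
  rw [htw]

theorem pvPairwiseLt (l : List Char) (h1 : l.Pairwise (· ≤ ·)) (h2 : l.Nodup) :
    l.Pairwise (· < ·) :=
  (h1.and h2).imp (fun h => lt_of_le_of_ne h.1 h.2)

theorem pvSortedSet_nodup (l : List Char) :
    (PySem.List.sorted (PySem.Set.ofList l) (fun c => c) false).Nodup :=
  ((PySem.List.sorted_perm (PySem.Set.ofList l) (fun c => c) false).nodup_iff).2 (PySem.Set.nodup_ofList l)

theorem pvSortedSet_mem (l : List Char) (x : Char) :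
    x ∈ PySem.List.sorted (PySem.Set.ofList l) (fun c => c) false ↔ x ∈ l := by
  rw [(PySem.List.sorted_perm (PySem.Set.ofList l) (fun c => c) false).mem_iff, PySem.Set.mem_ofList]

theorem pvSortedSet_lt (l : List Char) :
    (PySem.List.sorted (PySem.Set.ofList l) (fun c => c) false).Pairwise (· < ·) :=
  pvPairwiseLt _ (PySem.List.sorted_pairwise _ _) (pvSortedSet_nodup l)

theorem pvPairsOf_cons (c : Char) (t : List Char) (h : (c :: t).Pairwise (· ≤ ·)) :
    pvPairsOf (c :: t)
      = (c, List.count c (c :: t)) :: pvPairsOf ((c :: t).dropWhile (· = c)) := by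
  have hcr : c ∉ (c :: t).dropWhile (· = c) := fun hc => absurd rfl (ne_of_gt (pvSuffix_gt c t h c hc))
  have hmem : ∀ x, x ∈ (c :: t) ↔ x = c ∨ x ∈ (c :: t).dropWhile (· = c) := by
    intro x
    conv_lhs => rw [pvRunDecomp c t h]
    rw [List.mem_append, List.mem_replicate]
    constructor
    · rintro (⟨hn, hx⟩ | hx)
      · exact Or.inl hx
      · exact Or.inr hx
    · rintro (hx | hx)
      · left
        refine ⟨?_, hx⟩
        have : 0 < List.count c (c :: t) := by simp
        omega
      · exact Or.inr hx
  have hset : PySem.List.sorted (PySem.Set.ofList (c :: t)) (fun c => c) false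
      = c :: PySem.List.sorted (PySem.Set.ofList ((c :: t).dropWhile (· = c))) (fun c => c) false := by
    apply PySem.List.sorted_eq_of_perm_of_pairwise_lt
    · rw [List.perm_ext_iff_of_nodup]
      · intro x
        rw [List.mem_cons, pvSortedSet_mem, PySem.Set.mem_ofList, ← hmem]
      · constructor
        · intro a' ha' hca
          subst hca
          exact hcr ((pvSortedSet_mem _ c).1 ha')
        · exact pvSortedSet_nodup _
      · exact PySem.Set.nodup_ofList _
    · rw [List.pairwise_cons]
      refine ⟨?_, pvSortedSet_lt _⟩
      intro x hx
      exact pvSuffix_gt c t h x ((pvSortedSet_mem _ x).1 hx)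
  rw [pvPairsOf, hset, List.map_cons]
  congr 1
  rw [pvPairsOf]
  apply List.map_congr_left
  intro d hd
  have hdr : d ∈ (c :: t).dropWhile (· = c) := (pvSortedSet_mem _ d).1 hd
  have hdc : d ≠ c := ne_of_gt (pvSuffix_gt c t h d hdr)
  congr 1
  conv_lhs => rw [pvRunDecomp c t h]
  rw [List.count_append, List.count_replicate]
  simp [hdc.symm]

theorem pvMain (n : Nat) : ∀ (l : List Char), l.length ≤ n → l.Pairwise (· ≤ ·) →
    ∀ acc, pvF l acc = pvG (pvPairsOf l) acc := by
  induction n with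
  | zero =>
    intro l hl _ acc
    have : l = [] := List.eq_nil_of_length_eq_zero (by omega)
    subst this
    simp [pvF, pvG, pvPairsOf, PySem.Set.ofList, PySem.List.sorted]
  | succ n ih =>
    intro l hl hp acc
    cases l with
    | nil => simp [pvF, pvG, pvPairsOf, PySem.Set.ofList, PySem.List.sorted]
    | cons c t =>
      have hr : ∀ d ∈ ((c :: t).dropWhile (· = c)).head?, d ≠ c := by
        intro d hd
        cases hh : ((c :: t).dropWhile (· = c)).head? with
        | none => rw [hh] at hd; simp at hd
        | some e =>
          rw [hh] at hd
          simp at hd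
          subst hd
          exact ne_of_gt (pvSuffix_gt c t hp _ (List.mem_of_mem_head? (hh ▸ rfl)))
      have hlen : ((c :: t).dropWhile (· = c)).length ≤ n := by
        have h1 : (c :: t).dropWhile (· = c) = t.dropWhile (· = c) := by
          rw [List.dropWhile_cons]
          simp
        rw [h1]
        have := List.length_dropWhile_le (· = c) t
        simp at hl
        omega
      have hps : ((c :: t).dropWhile (· = c)).Pairwise (· ≤ ·) :=
        List.Pairwise.sublist (List.dropWhile_sublist _) hp
      rw [pvPairsOf_cons c t hp, pvG]
      conv_lhs => rw [pvRunDecomp c t hp]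
      rw [pvF_run _ _ _ _ hr]
      apply List.flatMap_congr
      intro k hk
      exact ih _ hlen hps _

-- ===== VERDICT (by name: the statement is the Claim_ definition above) =====
theorem get_distinct_subsets_spec : Claim_equal_get_distinct_subsets := by
  intro s _
  unfold Spec_get_distinct_subsets
  rw [get_distinct_subsets, get_distinct_subsets_alt]
  rw [pvBTA_eq_pvF, pvBuildB_eq_pvG _ _ _ (by intro p hp; simp at hp; obtain ⟨c, hc⟩ := hp; simp [← hc.2])]
  rw [List.drop_zero, List.nil_append, List.nil_append]
  set l' := PySem.List.sorted s.toList (fun c => c) false with hl'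
  have hperm : l'.Perm s.toList := PySem.List.sorted_perm _ _ _
  have hT : PySem.List.sorted (PySem.Set.ofList s.toList) (fun c => c) false
      = PySem.List.sorted (PySem.Set.ofList l') (fun c => c) false := by
    apply PySem.List.sorted_eq_of_perm_of_pairwise_lt
    · rw [List.perm_ext_iff_of_nodup (pvSortedSet_nodup _) (PySem.Set.nodup_ofList _)]
      intro x
      rw [pvSortedSet_mem, PySem.Set.mem_ofList, hperm.mem_iff]
    · exact pvSortedSet_lt _
  have hmap : ((PySem.List.sorted (PySem.Set.ofList s.toList) (fun c => c) false).map
        (fun c => (c, (PySem.List.count s.toList c : Int)))).map (fun p => (p.1, p.2.toNat))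
      = pvPairsOf l' := by
    rw [List.map_map, pvPairsOf, hT]
    apply List.map_congr_left
    intro c hc
    simp [PySem.List.count, Function.comp, hperm.count_eq]
  rw [hmap]
  exact pvMain l'.length l' le_rfl (PySem.List.sorted_pairwise _ _) []
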